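-- pv_equiv track=rewrite | github.com/yasminejune/pv_bess_optimiser | src/ors/services/price_api/price_api.py | choose_target_price_col
-- ===== SOURCE A (Python) =====
-- def choose_target_price_col(columns) -> str | None:
--     """Pick the best available target price column by priority."""
--     cols = list(columns)
--     lower = {c: c.lower() for c in cols}
--
--     priorities = [
--         "price_mid__price__vwap_providers",
--         "price_mid__price__avg_providers",
--         "price_mid__price__n2exmidp",
--         "price_mid__price__apxmidp",
--         "price_mid__price",
--         "marketindexprice",
--         "price",
--     ]
--     for p in priorities:
--         for c in cols:
--             if p in lower[c]:
--                 return c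
--
--     for c in cols:
--         if "price" in lower[c]:
--             return c
--     return None
-- ===== SOURCE B (Python) =====
-- PRIORITIES = [
--     "price_mid__price__vwap_providers",
--     "price_mid__price__avg_providers",
--     "price_mid__price__n2exmidp",
--     "price_mid__price__apxmidp",
--     "price_mid__price",
--     "marketindexprice",
--     "price",
-- ]
--
--
-- def choose_target_price_col(columns):
--     """Single column-major pass: rank each column by the first priority
--     substring it contains, keep the first column with the strictly smallest
--     rank.  The original's trailing 'price' fallback is dead code (covered by
--     the last priority), so no second phase is needed."""
--     best = None
--     best_rank = len(PRIORITIES)  # sentinel: worse than any real rank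
--     for c in columns:
--         cl = c.lower()
--         rank = next((i for i, p in enumerate(PRIORITIES) if p in cl), len(PRIORITIES))
--         if rank < best_rank:
--             best_rank = rank
--             best = c
--     return best
-- ===== Notes on version B (the rewrite author's own statement) =====
-- stated objective: alternative
-- what changed: Replaces A's priority-major nested loops (plus the dead trailing 'price' fallback and the lowered-name dict) with a single column-major pass that ranks each column by the first priority substring it contains and keeps the first column of strictly smallest rank.
import Mathlib
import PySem

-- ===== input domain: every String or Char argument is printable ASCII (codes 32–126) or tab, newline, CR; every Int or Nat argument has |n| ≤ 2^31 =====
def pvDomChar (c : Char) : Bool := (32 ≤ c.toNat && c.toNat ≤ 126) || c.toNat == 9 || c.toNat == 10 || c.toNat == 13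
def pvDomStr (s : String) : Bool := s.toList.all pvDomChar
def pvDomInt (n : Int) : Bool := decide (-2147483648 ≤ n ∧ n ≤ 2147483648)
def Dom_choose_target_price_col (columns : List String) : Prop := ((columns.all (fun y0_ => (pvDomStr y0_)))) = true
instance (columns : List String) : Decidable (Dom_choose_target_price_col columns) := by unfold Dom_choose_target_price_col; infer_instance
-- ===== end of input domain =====

-- B replaces A's priority-major double loop (plus dead 'price' fallback) by one
-- column-major pass keeping the first column of strictly smallest priority rank
-- (objective: alternative decomposition, same asymptotic cost).

-- the shared literal priority list of both Pythons
def pvPriorities : List String := [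
  "price_mid__price__vwap_providers",
  "price_mid__price__avg_providers",
  "price_mid__price__n2exmidp",
  "price_mid__price__apxmidp",
  "price_mid__price",
  "marketindexprice",
  "price"]

-- ===== PORT A =====
-- lower = {c: c.lower() for c in cols}
def pvLowerDict (cols : List String) : PySem.Dict String String :=
  cols.foldl (fun d c => d.insert c (PySem.Str.lower c)) PySem.Dict.empty

-- 'for c in cols: if p in lower[c]: return c' (lower[c] cannot KeyError: c ∈ cols,
-- so getD's default is never taken and the port is exact)
def pvFindCol (low : PySem.Dict String String) (p : String) : List String → Option String
  | [] => none
  | c :: cs => if PySem.Str.isIn p (low.getD c "") then some c else pvFindCol low p cs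

-- 'for p in priorities: …'
def pvLoopPriorities (low : PySem.Dict String String) (cols : List String) :
    List String → Option String
  | [] => none
  | p :: ps =>
    match pvFindCol low p cols with
    | some c => some c
    | none => pvLoopPriorities low cols ps

def choose_target_price_col (columns : List String) : Option String :=
  let low := pvLowerDict columns
  match pvLoopPriorities low columns pvPriorities with
  | some c => some c
  | none =>
    -- the trailing fallback loop has exactly the inner loop's shape with p = "price"
    match pvFindCol low "price" columns with
    | some c => some c
    | none => none

-- ===== PORT B =====
-- rank = next((i for i, p in enumerate(PRIORITIES) if p in cl), len(PRIORITIES))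
def pvRankOf : List String → String → Nat
  | [], _ => 0
  | p :: ps, cl => if PySem.Str.isIn p cl then 0 else pvRankOf ps cl + 1

def choose_target_price_col_alt (columns : List String) : Option String :=
  (columns.foldl
    (fun (st : Nat × Option String) c =>
      let r := pvRankOf pvPriorities (PySem.Str.lower c)
      if r < st.1 then (r, some c) else st)
    (pvPriorities.length, none)).2

-- ===== PRECONDITION & SPEC =====
def Spec_choose_target_price_col (columns : List String) (out : Option String) : Prop := out = choose_target_price_col_alt columns
instance (columns : List String) (out : Option String) : Decidable (Spec_choose_target_price_col columns out) := by unfold Spec_choose_target_price_col; infer_instance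

-- ===== CLAIM (what is proved, stated in full; the proofs are below) =====
def Claim_equal_choose_target_price_col : Prop := ∀ (columns : List String), Dom_choose_target_price_col columns → Spec_choose_target_price_col columns (choose_target_price_col columns)

-- ===== LEMMAS AND PROOFS =====

-- B's fold, generalized over the rank function and the running state
def pvGfold (r : String → Nat) (cols : List String) (st : Nat × Option String) : Nat × Option String :=
  cols.foldl (fun st c => if r c < st.1 then (r c, some c) else st) st

-- A's outer loop, rewritten over List.find? (the dict already resolved)
def pvOuterF : List String → List String → Option String
  | [], _ => none
  | p :: ps, cols =>
    match cols.find? (fun c => PySem.Str.isIn p (PySem.Str.lower c)) with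
    | some c => some c
    | none => pvOuterF ps cols

lemma pvLowerDict_getD_from (cols : List String) :
    ∀ (d : PySem.Dict String String) (c : String),
      c ∈ cols ∨ d.getD c "" = PySem.Str.lower c →
      (cols.foldl (fun d c => d.insert c (PySem.Str.lower c)) d).getD c "" = PySem.Str.lower c := by
  induction cols with
  | nil => intro d c h; simpa using h.resolve_left (by simp)
  | cons c0 cs ih =>
    intro d c h
    simp only [List.foldl_cons]
    apply ih
    by_cases hc : c = c0
    · subst hc; right; simp
    · rcases h with h | h
      · rcases List.mem_cons.mp h with h | h
        · exact absurd h hc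
        · exact Or.inl h
      · right; rw [PySem.Dict.getD_insert]; simpa [hc] using h

lemma pvLowerDict_getD (cols : List String) (c : String) (hc : c ∈ cols) :
    (pvLowerDict cols).getD c "" = PySem.Str.lower c :=
  pvLowerDict_getD_from cols PySem.Dict.empty c (Or.inl hc)

lemma pvFindCol_eq_find? (low : PySem.Dict String String) (p : String) (cols : List String)
    (hlow : ∀ c ∈ cols, low.getD c "" = PySem.Str.lower c) :
    pvFindCol low p cols = cols.find? (fun c => PySem.Str.isIn p (PySem.Str.lower c)) := by
  induction cols with
  | nil => rfl
  | cons c cs ih =>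
    have hc := hlow c (by simp)
    have ihs := ih (fun c' hc' => hlow c' (List.mem_cons_of_mem _ hc'))
    cases hb : PySem.Str.isIn p (PySem.Str.lower c) <;>
      simp only [pvFindCol, List.find?_cons, hc, hb, ihs] <;> simp

lemma pvLoop_eq_outerF (low : PySem.Dict String String) (cols : List String)
    (hlow : ∀ c ∈ cols, low.getD c "" = PySem.Str.lower c) :
    ∀ ps, pvLoopPriorities low cols ps = pvOuterF ps cols := by
  intro ps
  induction ps with
  | nil => rfl
  | cons p ps ih =>
    simp only [pvLoopPriorities, pvOuterF, pvFindCol_eq_find? low p cols hlow, ih]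

-- once the bound hits 0 the fold never updates
lemma pvGfold_zero (r : String → Nat) (cols : List String) (v : Option String) :
    pvGfold r cols (0, v) = (0, v) := by
  induction cols with
  | nil => rfl
  | cons c cs ih => simpa [pvGfold, List.foldl_cons] using ih

-- a first rank-0 column wins against any positive bound
lemma pvGfold_of_find_zero (r : String → Nat) (cols : List String) :
    ∀ (b : Nat) (v : Option String) (c0 : String),
      0 < b → cols.find? (fun c => r c = 0) = some c0 →
      pvGfold r cols (b, v) = (0, some c0) := by
  induction cols with
  | nil => intro b v c0 _ h; simp at h
  | cons c cs ih =>
    intro b v c0 hb h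
    rw [List.find?_cons] at h
    by_cases h0 : r c = 0
    · simp only [h0, decide_true] at h
      injection h with h; subst h
      simp only [pvGfold, List.foldl_cons, h0, if_pos hb]
      exact pvGfold_zero r cs (some c)
    · simp only [h0, decide_false] at h
      simp only [pvGfold, List.foldl_cons]
      split
      · exact ih (r c) (some c) c0 (Nat.pos_of_ne_zero h0) h
      · exact ih b v c0 hb h
  
-- shifting every rank and the bound by one shifts the kept bound and keeps the column
lemma pvGfold_shift (r : String → Nat) (cols : List String) :
    ∀ (b : Nat) (v : Option String),
      pvGfold (fun c => r c + 1) cols (b + 1, v) =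
        ((pvGfold r cols (b, v)).1 + 1, (pvGfold r cols (b, v)).2) := by
  induction cols with
  | nil => intro b v; rfl
  | cons c cs ih =>
    intro b v
    simp only [pvGfold, List.foldl_cons] at *
    by_cases h : r c < b
    · rw [if_pos (by omega), if_pos h]; exact ih (r c) (some c)
    · rw [if_neg (by omega), if_neg h]; exact ih b v

lemma pvGfold_congr (r1 r2 : String → Nat) (cols : List String)
    (h : ∀ c ∈ cols, r1 c = r2 c) :
    ∀ st, pvGfold r1 cols st = pvGfold r2 cols st := by
  induction cols with
  | nil => intro st; rfl
  | cons c cs ih =>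
    intro st
    simp only [pvGfold, List.foldl_cons, h c (by simp)]
    exact ih (fun c' hc' => h c' (List.mem_cons_of_mem _ hc')) _

-- the heart: priority-major search = column-major argmin of the rank
lemma pvOuterF_eq_gfold : ∀ (ps cols : List String),
    pvOuterF ps cols =
      (pvGfold (fun c => pvRankOf ps (PySem.Str.lower c)) cols (ps.length, none)).2 := by
  intro ps
  induction ps with
  | nil =>
    intro cols
    simp [pvOuterF, pvRankOf, List.length_nil, pvGfold_zero]
  | cons p ps ih =>
    intro cols
    simp only [pvOuterF]
    cases h : cols.find? (fun c => PySem.Str.isIn p (PySem.Str.lower c)) with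
    | some c0 =>
      have hfind : cols.find? (fun c => decide (pvRankOf (p :: ps) (PySem.Str.lower c) = 0)) = some c0 := by
        rw [← h]
        congr 1
        funext c
        cases hb : PySem.Str.isIn p (PySem.Str.lower c) <;>
          simp only [pysem] at hb <;>
          simp [pvRankOf, hb, PySem.Chars.isIn_iff_infix]
      rw [List.length_cons,
        pvGfold_of_find_zero _ cols (ps.length + 1) none c0 (Nat.succ_pos _) hfind]
    | none =>
      have hall : ∀ c ∈ cols,
          pvRankOf (p :: ps) (PySem.Str.lower c) = pvRankOf ps (PySem.Str.lower c) + 1 := by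
        intro c hc
        have hb := List.find?_eq_none.mp h c hc
        simp only [Bool.not_eq_true] at hb
        simp only [pvRankOf, hb, Bool.false_eq_true, if_false]
      rw [pvGfold_congr _ _ cols hall, List.length_cons,
        pvGfold_shift (fun c => pvRankOf ps (PySem.Str.lower c)) cols ps.length none, ih]

-- if the outer search failed, no priority — in particular "price" — matches any column
lemma pvOuterF_none_find (ps cols : List String) (p : String) (hp : p ∈ ps)
    (h : pvOuterF ps cols = none) :
    cols.find? (fun c => PySem.Str.isIn p (PySem.Str.lower c)) = none := by
  induction ps with
  | nil => simp at hp
  | cons q qs ih =>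
    simp only [pvOuterF] at h
    cases hq : cols.find? (fun c => PySem.Str.isIn q (PySem.Str.lower c)) with
    | some c => rw [hq] at h; simp at h
    | none =>
      rw [hq] at h
      rcases List.mem_cons.mp hp with rfl | hp'
      · exact hq
      · exact ih hp' h

-- ===== VERDICT (by name: the statement is the Claim_ definition above) =====
theorem choose_target_price_col_spec : Claim_equal_choose_target_price_col := by
  intro columns _
  show choose_target_price_col columns = choose_target_price_col_alt columns
  have hlow : ∀ c ∈ columns, (pvLowerDict columns).getD c "" = PySem.Str.lower c :=
    fun c hc => pvLowerDict_getD columns c hc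
  have hloop := pvLoop_eq_outerF (pvLowerDict columns) columns hlow pvPriorities
  have hB : choose_target_price_col_alt columns =
      (pvGfold (fun c => pvRankOf pvPriorities (PySem.Str.lower c)) columns
        (pvPriorities.length, none)).2 := rfl
  rw [hB, ← pvOuterF_eq_gfold]
  show (match pvLoopPriorities (pvLowerDict columns) columns pvPriorities with
    | some c => some c
    | none =>
      match pvFindCol (pvLowerDict columns) "price" columns with
      | some c => some c
      | none => none) = pvOuterF pvPriorities columns
  rw [hloop]
  cases h : pvOuterF pvPriorities columns with
  | some c => rfl
  | none =>
    have hprice : columns.find? (fun c => PySem.Str.isIn "price" (PySem.Str.lower c)) = none :=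
      pvOuterF_none_find pvPriorities columns "price" (by simp [pvPriorities]) h
    rw [pvFindCol_eq_find? _ _ _ hlow, hprice]
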